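-- pv_equiv track=rewrite | github.com/Lxkasmehl/TurtleTracker | backend/routes/admin_backup.py | _safe_folder_name
-- ===== SOURCE A (Python) =====
-- def _safe_folder_name(sheet_name: str) -> str:
--     """Match turtle_manager._safe_folder_name for on-disk paths."""
--     invalid = r'\/:*?"<>|'
--     if not sheet_name or not isinstance(sheet_name, str):
--         return "_"
--     out = sheet_name.strip()
--     for c in invalid:
--         out = out.replace(c, "_")
--     return out or "_"
-- ===== SOURCE B (Python) =====
-- _INVALID = set(r'\/:*?"<>|')
--
-- def _safe_folder_name(sheet_name: str) -> str:
--     if not sheet_name or not isinstance(sheet_name, str):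
--         return "_"
--     cleaned = "".join("_" if ch in _INVALID else ch for ch in sheet_name.strip())
--     return cleaned or "_"
-- ===== Notes on version B (the rewrite author's own statement) =====
-- stated objective: simpler
-- what changed: One left-to-right pass over the stripped string with a set membership test and a single join, instead of nine sequential whole-string str.replace passes.
import Mathlib
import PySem

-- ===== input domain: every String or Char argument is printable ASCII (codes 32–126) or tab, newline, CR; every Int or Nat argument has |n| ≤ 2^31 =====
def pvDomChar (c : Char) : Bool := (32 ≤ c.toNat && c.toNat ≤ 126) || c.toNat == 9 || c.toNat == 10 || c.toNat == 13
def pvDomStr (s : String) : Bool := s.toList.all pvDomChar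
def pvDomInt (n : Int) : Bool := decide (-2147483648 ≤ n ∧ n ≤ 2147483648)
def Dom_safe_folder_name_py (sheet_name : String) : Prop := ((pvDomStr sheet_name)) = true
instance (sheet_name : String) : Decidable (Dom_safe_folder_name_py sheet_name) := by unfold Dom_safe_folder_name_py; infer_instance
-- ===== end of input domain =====

-- B replaces A's nine sequential whole-string replace passes by one pass with a set membership test (objective: simpler).

-- ===== PORT A =====
-- invalid = r'\/:*?"<>|'
def pvInvalidA : String := "\\/:*?\"<>|"

def safe_folder_name_py (sheet_name : String) : String :=
  if sheet_name = "" then "_"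
  else
    -- out = sheet_name.strip(); for c in invalid: out = out.replace(c, "_")
    let out := pvInvalidA.toList.foldl
      (fun o c => PySem.Str.replace o (String.ofList [c]) "_")
      (PySem.Str.strip sheet_name)
    if out = "" then "_" else out

-- ===== PORT B =====
def pvInvalidSet : List Char := ['\\', '/', ':', '*', '?', '"', '<', '>', '|']

def safe_folder_name_py_alt (sheet_name : String) : String :=
  if sheet_name = "" then "_"
  else
    -- cleaned = "".join("_" if ch in _INVALID else ch for ch in sheet_name.strip())
    let cleaned := String.ofList
      ((PySem.Str.strip sheet_name).toList.map
        (fun ch => if pvInvalidSet.contains ch then '_' else ch))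
    if cleaned = "" then "_" else cleaned

-- ===== PRECONDITION & SPEC =====
def Spec_safe_folder_name_py (sheet_name : String) (out : String) : Prop := out = safe_folder_name_py_alt sheet_name
instance (sheet_name : String) (out : String) : Decidable (Spec_safe_folder_name_py sheet_name out) := by unfold Spec_safe_folder_name_py; infer_instance

-- ===== CLAIM (what is proved, stated in full; the proofs are below) =====
def Claim_equal_safe_folder_name_py : Prop := ∀ (sheet_name : String), Dom_safe_folder_name_py sheet_name → Spec_safe_folder_name_py sheet_name (safe_folder_name_py sheet_name)

-- ===== LEMMAS AND PROOFS =====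

-- replacing a single character is a pointwise map
theorem replace_go_single (c r : Char) : ∀ (fuel : Nat) (l acc : List Char),
    l.length ≤ fuel →
    PySem.Chars.replace.go [c] [r] fuel l acc
      = acc.reverse ++ l.map (fun x => if x = c then r else x) := by
  intro fuel
  induction fuel with
  | zero =>
    intro l acc h
    have : l = [] := List.length_eq_zero_iff.mp (Nat.le_zero.mp h)
    subst this
    simp [PySem.Chars.replace.go]
  | succ n ih =>
    intro l acc h
    cases l with
    | nil => simp [PySem.Chars.replace.go]
    | cons x t =>
      by_cases hx : x = c
      · subst hx
        have hp : List.isPrefixOf [x] (x :: t) = true := by simp [List.isPrefixOf]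
        simp only [PySem.Chars.replace.go, hp, if_pos]
        rw [ih]
        · simp
        · simpa using Nat.le_of_succ_le_succ h
      · have hp : List.isPrefixOf [c] (x :: t) = false := by
          simp only [List.isPrefixOf]
          simp only [Bool.and_eq_false_iff, beq_eq_false_iff_ne, ne_eq]
          left; exact fun hh => hx hh.symm
        simp only [PySem.Chars.replace.go, hp]
        rw [if_neg (by simp), ih t (x :: acc) (by simpa using Nat.le_of_succ_le_succ h)]
        simp [hx]

theorem replace_single (c r : Char) (s : List Char) :
    PySem.Chars.replace s [c] [r] = s.map (fun x => if x = c then r else x) := by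
  simp [PySem.Chars.replace]
  rw [replace_go_single c r s.length s [] le_rfl]
  simp

-- folding single-char replacements over cs is a single map with a membership test,
-- provided the replacement character is not itself replaced later
theorem foldl_replace_eq_map (r : Char) : ∀ (cs : List Char), r ∉ cs → ∀ (s : List Char),
    cs.foldl (fun o c => PySem.Chars.replace o [c] [r]) s
      = s.map (fun x => if cs.contains x then r else x) := by
  intro cs
  induction cs with
  | nil => intro _ s; simp
  | cons c t ih =>
    intro hr s
    have hrt : r ∉ t := fun h => hr (List.mem_cons_of_mem _ h)
    simp only [List.foldl_cons]
    rw [replace_single, ih hrt, List.map_map]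
    apply List.map_congr_left
    intro x _
    by_cases hx : x = c
    · subst hx
      simp [List.contains_eq_mem, hrt]
    · simp [List.contains_eq_mem, hx]

theorem invalid_toList_eq : pvInvalidA.toList = pvInvalidSet := by rfl

theorem underscore_not_invalid : '_' ∉ pvInvalidSet := by decide

-- the String-level foldl of A computes the Chars-level foldl
theorem bridge_foldl (cs : List Char) (t : String) :
    (cs.foldl (fun o c => PySem.Str.replace o (String.ofList [c]) "_") t).toList
      = cs.foldl (fun o c => PySem.Chars.replace o [c] ['_']) t.toList := by
  induction cs generalizing t with
  | nil => rfl
  | cons c cs ih =>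
    simp only [List.foldl_cons, ih, PySem.Str.toList_replace]
    congr 1
    simp

theorem safe_folder_name_py_ports_eq (s : String) :
    safe_folder_name_py s = safe_folder_name_py_alt s := by
  unfold safe_folder_name_py safe_folder_name_py_alt
  by_cases h : s = ""
  · simp [h]
  · simp only [h, ite_false]
    have hval : pvInvalidA.toList.foldl
        (fun o c => PySem.Str.replace o (String.ofList [c]) "_")
        (PySem.Str.strip s)
        = String.ofList ((PySem.Str.strip s).toList.map
            (fun ch => if pvInvalidSet.contains ch then '_' else ch)) := by
      apply String.toList_injective
      rw [bridge_foldl, invalid_toList_eq,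
        foldl_replace_eq_map '_' pvInvalidSet underscore_not_invalid]
      simp
    rw [hval]

-- ===== VERDICT (by name: the statement is the Claim_ definition above) =====
theorem safe_folder_name_py_spec : Claim_equal_safe_folder_name_py := by
  intro s _
  unfold Spec_safe_folder_name_py
  exact safe_folder_name_py_ports_eq s
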